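-- pv_equiv track=rewrite | github.com/Laoluog/Dinner | dinner.py | find_dislikes
-- ===== SOURCE A (Python) =====
-- def find_dislikes(friends: dict)->set[tuple[str]]:
--     """Given a dictionary-based adjacency list of String-based nodes,
--        returns a set of all edges in the graph (ie. dislikes who can't be invited together).
--     """
--     myset = set()
--     for key in friends.keys():
--         x = key
--         for seckey in friends.keys():
--             if seckey != x:
--                 keyvals = friends.get(seckey)
--                 if x in keyvals:
--                     ntuple = []
--                     ntuple.append(seckey)
--                     ntuple.append(x)
--                     ntuple = sorted(ntuple)
--                     myset.add(tuple(ntuple))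
--     return myset
-- ===== SOURCE B (Python) =====
-- def find_dislikes(friends: dict) -> set:
--     """Collect all edges (dislike pairs) via a reverse index: O(V+E) instead of scanning all key pairs."""
--     rev = {}
--     for node, neighbors in friends.items():
--         for v in neighbors:
--             rev.setdefault(v, []).append(node)
--     myset = set()
--     for x in friends:
--         for seckey in rev.get(x, []):
--             if seckey != x:
--                 myset.add(tuple(sorted((seckey, x))))
--     return myset
-- ===== Notes on version B (the rewrite author's own statement) =====
-- stated objective: faster
-- what changed: B builds a reverse index (value -> nodes whose adjacency list contains it) in one pass over the lists, then reads each key's edges off that index, instead of A's scan of every key pair with a membership test into each list.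
import Mathlib
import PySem

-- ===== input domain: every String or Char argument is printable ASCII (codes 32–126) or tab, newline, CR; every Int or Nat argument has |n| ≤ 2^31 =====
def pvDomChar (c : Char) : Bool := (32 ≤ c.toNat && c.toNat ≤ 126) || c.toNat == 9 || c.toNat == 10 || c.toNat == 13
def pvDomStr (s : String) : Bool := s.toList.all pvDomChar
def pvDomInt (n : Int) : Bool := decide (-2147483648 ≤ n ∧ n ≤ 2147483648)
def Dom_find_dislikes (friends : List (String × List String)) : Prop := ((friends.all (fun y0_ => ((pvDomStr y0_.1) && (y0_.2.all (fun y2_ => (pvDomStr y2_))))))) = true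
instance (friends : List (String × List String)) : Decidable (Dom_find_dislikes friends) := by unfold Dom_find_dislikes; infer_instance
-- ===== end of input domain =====

-- B replaces A's all-pairs key scan by a reverse index built in one pass over the adjacency lists (alternative algorithm, fewer passes).


-- ===== PORT A =====
-- literal port of A: for each key x, scan every other key seckey, look its list up, and add sorted([seckey, x]) when x is in it
def find_dislikes (friends : List (String × List String)) : List (List String) :=
  let d := PySem.Dict.mk friends
  (PySem.Dict.keys d).foldl (fun myset x =>
    (PySem.Dict.keys d).foldl (fun myset seckey =>
      if seckey ≠ x then
        match PySem.Dict.get? d seckey with          -- friends.get(seckey); always found, seckey is a key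
        | some keyvals =>
            if x ∈ keyvals then
              PySem.Set.add myset (PySem.List.sorted [seckey, x] (fun s => s) false)
            else myset
        | none => myset
      else myset) myset) PySem.Set.empty

-- ===== PORT B =====
-- literal port of B: build the reverse index rev (rev[v] = nodes whose list contains v), then walk rev[x] for each key x
def find_dislikes_alt (friends : List (String × List String)) : List (List String) :=
  let rev : PySem.Dict String (List String) :=
    friends.foldl (fun rev p =>
      p.2.foldl (fun rev v => PySem.Dict.modify rev v [] (· ++ [p.1])) rev) PySem.Dict.empty
  friends.foldl (fun myset p =>
    (PySem.Dict.getD rev p.1 []).foldl (fun myset seckey =>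
      if seckey ≠ p.1 then
        PySem.Set.add myset (PySem.List.sorted [seckey, p.1] (fun s => s) false)
      else myset) myset) PySem.Set.empty

-- ===== PRECONDITION & SPEC =====
-- Pre_ excludes association lists with duplicate keys: they do not represent a Python dict (A's argument is a dict,
-- whose keys are necessarily unique), so no dict input is excluded.
def Pre_find_dislikes (friends : List (String × List String)) : Prop :=
  (friends.map Prod.fst).Nodup
instance (friends : List (String × List String)) : Decidable (Pre_find_dislikes friends) := by unfold Pre_find_dislikes; infer_instance
def pvWitness_find_dislikes : (List (String × List String)) := [("a", ["b"]), ("b", [])]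

def Spec_find_dislikes (friends : List (String × List String)) (out : List (List String)) : Prop := out = find_dislikes_alt friends
instance (friends : List (String × List String)) (out : List (List String)) : Decidable (Spec_find_dislikes friends out) := by unfold Spec_find_dislikes; infer_instance

-- ===== CLAIM (what is proved, stated in full; the proofs are below) =====
def Claim_equal_find_dislikes : Prop := ∀ (friends : List (String × List String)), Dom_find_dislikes friends → Pre_find_dislikes friends → Spec_find_dislikes friends (find_dislikes friends)

-- ===== LEMMAS AND PROOFS =====

-- the add-if loop over a constant-element list collapses to (at most) one add
lemma pv_const_addloop (l : List String) (k x : String) (s : PySem.Set (List String)) :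
    (l.map (fun _ => k)).foldl
      (fun s k' => if k' ≠ x then PySem.Set.add s (PySem.List.sorted [k', x] (fun s => s) false) else s) s
    = if l ≠ [] ∧ k ≠ x then PySem.Set.add s (PySem.List.sorted [k, x] (fun s => s) false) else s := by
  induction l generalizing s with
  | nil => simp
  | cons h t ih =>
    simp only [List.map_cons, List.foldl_cons]
    by_cases hk : k = x
    · rw [if_neg (by simp [hk]), ih]; simp [hk]
    · rw [if_pos (by exact hk), ih]
      rcases t with _ | ⟨u, v⟩ <;> simp [hk]

-- characterisation of the reverse index built by B
lemma pv_rev_getD (friends : List (String × List String)) (d : PySem.Dict String (List String)) (x : String) :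
    (friends.foldl (fun rev p =>
        p.2.foldl (fun rev v => PySem.Dict.modify rev v [] (· ++ [p.1])) rev) d).getD x []
    = d.getD x [] ++ friends.flatMap (fun p => (p.2.filter (· == x)).map (fun _ => p.1)) := by
  induction friends generalizing d with
  | nil => simp
  | cons p t ih =>
    simp only [List.foldl_cons, ih, List.flatMap_cons, ← List.append_assoc]
    congr 1
    have h1 : p.2.foldl (fun rev v => PySem.Dict.modify rev v [] (· ++ [p.1])) d
        = (p.2.map (fun v => (v, p.1))).foldl (fun rev q => PySem.Dict.modify rev q.1 [] (· ++ [q.2])) d := by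
      simp [List.foldl_map]
    rw [h1, PySem.Dict.getD_foldl_modify_append, List.filter_map, List.map_map]
    rfl

-- both inner loops compute the same canonical fold over the pair list
lemma pv_inner_B (friends : List (String × List String)) (x : String) (s : PySem.Set (List String)) :
    ((friends.foldl (fun rev p =>
        p.2.foldl (fun rev v => PySem.Dict.modify rev v [] (· ++ [p.1])) rev) PySem.Dict.empty).getD x []).foldl
      (fun s k' => if k' ≠ x then PySem.Set.add s (PySem.List.sorted [k', x] (fun s => s) false) else s) s
    = friends.foldl
        (fun s p => if p.1 ≠ x ∧ x ∈ p.2 then PySem.Set.add s (PySem.List.sorted [p.1, x] (fun s => s) false) else s) s := by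
  rw [pv_rev_getD]
  simp only [PySem.Dict.getD_empty, List.nil_append, List.foldl_flatMap]
  apply PySem.List.foldl_congr_mem
  intro acc p _
  rw [pv_const_addloop]
  have hmem : (p.2.filter (· == x) ≠ []) ↔ x ∈ p.2 := by
    simp [List.filter_eq_nil_iff]
  by_cases h1 : p.1 = x <;> by_cases h2 : x ∈ p.2 <;> simp [h1, h2, hmem]

lemma pv_inner_A (friends : List (String × List String)) (hnd : (friends.map Prod.fst).Nodup)
    (x : String) (s : PySem.Set (List String)) :
    (friends.map Prod.fst).foldl (fun myset seckey =>
      if seckey ≠ x then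
        match PySem.Dict.get? (PySem.Dict.mk friends) seckey with
        | some keyvals =>
            if x ∈ keyvals then
              PySem.Set.add myset (PySem.List.sorted [seckey, x] (fun s => s) false)
            else myset
        | none => myset
      else myset) s
    = friends.foldl
        (fun s p => if p.1 ≠ x ∧ x ∈ p.2 then PySem.Set.add s (PySem.List.sorted [p.1, x] (fun s => s) false) else s) s := by
  rw [List.foldl_map]
  apply PySem.List.foldl_congr_mem
  intro acc p hp
  have hget : PySem.Dict.get? (PySem.Dict.mk friends) p.1 = some p.2 := by
    apply PySem.Dict.get?_of_mem_items
    · exact hp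
    · exact hnd
  rw [hget]
  by_cases h1 : p.1 = x <;> by_cases h2 : x ∈ p.2 <;> simp [h1, h2]

theorem pv_main (friends : List (String × List String)) (hnd : (friends.map Prod.fst).Nodup) :
    find_dislikes friends = find_dislikes_alt friends := by
  simp only [find_dislikes, find_dislikes_alt]
  rw [show PySem.Dict.keys (PySem.Dict.mk friends) = friends.map Prod.fst from rfl, List.foldl_map]
  apply PySem.List.foldl_congr_mem
  intro acc p _
  rw [pv_inner_A friends hnd p.1 acc, ← pv_inner_B friends p.1 acc]

-- ===== VERDICT (by name: the statement is the Claim_ definition above) =====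
theorem find_dislikes_spec : Claim_equal_find_dislikes := by
  intro friends _ hpre
  exact pv_main friends hpre
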